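-- pv_equiv track=rewrite | github.com/12300238/brute_force | calcule_possibilité/finder.py | legite
-- ===== SOURCE A (Python) =====
-- from typing import List
--
-- def legite(tab:List[int]):
--   '''
--   vérifit si la l'enchainement est possible a reproduire sur le chema
--
--   param tab: liste a vérifier
--   retourne: True si l'enchainement est possible, False sinon
--   '''
--
--   i = 0
--   précedent = []
--
--   while i+1<len(tab):
--     if tab[i]==1:
--       #si un nombre est déjà pris alors on peut accéder a celui derière
--       if not 2 in précedent and 3 == tab[i+1]:
--         return False
--       elif not 4 in précedent and 7 == tab[i+1]:
--         return False
--       elif not 5 in précedent and 9 == tab[i+1]: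
--         return False
--       #si le nombre suivant est accessible directement
--       elif not (tab[i+1] in [2,4,5,8,6]):
--         return False
--
--     elif tab[i]==2:
--       if not 5 in précedent and 8 == tab[i+1]:
--         return False
--       elif not (tab[i+1] in [1,3,4,5,6,7,9]):
--         return False
--
--     elif tab[i]==3:
--       if not 2 in précedent and 1 == tab[i+1]:
--         return False
--       elif not 6 in précedent and 9 == tab[i+1]:
--         return False
--       elif not 5 in précedent and 7 == tab[i+1]:
--         return False
--       elif not (tab[i+1] in [2,4,5,8,6]):
--         return False
--
--     elif tab[i]==4:
--       if not 5 in précedent and 6 == tab[i+1]: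
--         return False
--       elif not (tab[i+1] in [1,2,3,5,7,8,9]):
--         return False
--
--     elif tab[i]==6:
--       if not 5 in précedent and 4 == tab[i+1]:
--         return False
--       elif not (tab[i+1] in [1,2,3,5,7,8,9]):
--         return False
--
--     elif tab[i]==7:
--       if not 4 in précedent and 1 == tab[i+1]:
--         return False
--       elif not 8 in précedent and 9 == tab[i+1]:
--         return False
--       elif not 5 in précedent and 3 == tab[i+1]:
--         return False
--       elif not (tab[i+1] in [2,4,5,8,6]):
--         return False
--
--     elif tab[i]==8:
--       if not 5 in précedent and 2 == tab[i+1]: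
--         return False
--       elif not (tab[i+1] in [1,3,4,5,6,7,9]):
--         return False
--
--     elif tab[i]==9:
--       if not 6 in précedent and 3 == tab[i+1]:
--         return False
--       elif not 5 in précedent and 1 == tab[i+1]:
--         return False
--       elif not 8 in précedent and 7 == tab[i+1]:
--         return False
--       elif not (tab[i+1] in [2,4,5,8,6]):
--         return False
--
--     #la liste de tout les nombres déjà traité dans le tableau actuel
--     précedent.append(tab[i])
--     i+=1
--
--   return True
-- ===== SOURCE B (Python) =====
-- from typing import List
--
-- # Allowed direct successors per cell; cell 5 and out-of-range values are unconstrained.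
-- # The "already visited" rules of A are inert: every jump target (e.g. 1->3 over 2)
-- # is already absent from the source cell's direct list, so the move fails either way.
-- _ALLOWED = {
--     1: {2, 4, 5, 8, 6},
--     2: {1, 3, 4, 5, 6, 7, 9},
--     3: {2, 4, 5, 8, 6},
--     4: {1, 2, 3, 5, 7, 8, 9},
--     6: {1, 2, 3, 5, 7, 8, 9},
--     7: {2, 4, 5, 8, 6},
--     8: {1, 3, 4, 5, 6, 7, 9},
--     9: {2, 4, 5, 8, 6},
-- }
--
-- def legite(tab: List[int]):
--     for a, b in zip(tab, tab[1:]):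
--         s = _ALLOWED.get(a)
--         if s is not None and b not in s:
--             return False
--     return True
-- ===== Notes on version B (the rewrite author's own statement) =====
-- stated objective: simpler
-- what changed: Replaces the nine-branch while-loop that tracks a growing visited list with a single pass over consecutive pairs against a precomputed successor dict; the visited list is dropped because every 'jump over a cell' target is already absent from the source cell's direct-successor list, so those branches return False regardless of it.
import Mathlib
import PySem

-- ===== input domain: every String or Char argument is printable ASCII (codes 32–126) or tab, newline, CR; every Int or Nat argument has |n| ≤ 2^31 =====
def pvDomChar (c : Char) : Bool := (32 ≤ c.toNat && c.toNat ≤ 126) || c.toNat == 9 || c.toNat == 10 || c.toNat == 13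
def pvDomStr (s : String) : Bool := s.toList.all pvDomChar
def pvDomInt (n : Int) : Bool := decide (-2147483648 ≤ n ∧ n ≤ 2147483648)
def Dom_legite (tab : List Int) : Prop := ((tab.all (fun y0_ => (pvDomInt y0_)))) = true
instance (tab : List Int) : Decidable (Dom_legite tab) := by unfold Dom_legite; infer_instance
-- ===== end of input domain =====

-- B replaces A's nine-branch while-loop (with its inert "précedent" visited list) by a single
-- pass over consecutive pairs against a precomputed successor table — objective: simpler.


-- ===== PORT A =====
-- loop body of A: given the visited list `prec`, current value `a` = tab[i] and next value
-- `b` = tab[i+1], `true` means one of the `return False` branches fires.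
def legiteBody (prec : List Int) (a b : Int) : Bool :=
  if a == 1 then
    if !(prec.contains 2) && b == 3 then true
    else if !(prec.contains 4) && b == 7 then true
    else if !(prec.contains 5) && b == 9 then true
    else if !([2,4,5,8,6].contains b) then true
    else false
  else if a == 2 then
    if !(prec.contains 5) && b == 8 then true
    else if !([1,3,4,5,6,7,9].contains b) then true
    else false
  else if a == 3 then
    if !(prec.contains 2) && b == 1 then true
    else if !(prec.contains 6) && b == 9 then true
    else if !(prec.contains 5) && b == 7 then true
    else if !([2,4,5,8,6].contains b) then true
    else false
  else if a == 4 then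
    if !(prec.contains 5) && b == 6 then true
    else if !([1,2,3,5,7,8,9].contains b) then true
    else false
  else if a == 6 then
    if !(prec.contains 5) && b == 4 then true
    else if !([1,2,3,5,7,8,9].contains b) then true
    else false
  else if a == 7 then
    if !(prec.contains 4) && b == 1 then true
    else if !(prec.contains 8) && b == 9 then true
    else if !(prec.contains 5) && b == 3 then true
    else if !([2,4,5,8,6].contains b) then true
    else false
  else if a == 8 then
    if !(prec.contains 5) && b == 2 then true
    else if !([1,3,4,5,6,7,9].contains b) then true
    else false
  else if a == 9 then
    if !(prec.contains 6) && b == 3 then true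
    else if !(prec.contains 5) && b == 1 then true
    else if !(prec.contains 8) && b == 7 then true
    else if !([2,4,5,8,6].contains b) then true
    else false
  else false

-- the while loop: state is the index i and the visited list précedent
def legiteGo (tab : List Int) (prec : List Int) (i : Nat) : Bool :=
  if i + 1 < tab.length then
    let a := (tab[i]?).getD 0        -- in range: i < len
    let b := (tab[i+1]?).getD 0    -- in range: i+1 < len
    if legiteBody prec a b then false
    else legiteGo tab (prec ++ [a]) (i + 1)
  else true
termination_by tab.length - i

def legite (tab : List Int) : Bool := legiteGo tab [] 0

-- ===== PORT B =====
-- successor table: cell ↦ directly reachable successors (cell 5 and other values unconstrained)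
def pvAllowed : PySem.Dict Int (List Int) := PySem.Dict.ofList
  [(1, [2,4,5,8,6]), (2, [1,3,4,5,6,7,9]), (3, [2,4,5,8,6]), (4, [1,2,3,5,7,8,9]),
   (6, [1,2,3,5,7,8,9]), (7, [2,4,5,8,6]), (8, [1,3,4,5,6,7,9]), (9, [2,4,5,8,6])]

-- the `for a, b in zip(tab, tab[1:])` loop
def legiteAltGo : List (Int × Int) → Bool
  | [] => true
  | (a, b) :: rest =>
    match PySem.Dict.get? pvAllowed a with
    | some s => if !(s.contains b) then false else legiteAltGo rest
    | none => legiteAltGo rest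

def legite_alt (tab : List Int) : Bool := legiteAltGo (tab.zip tab.tail)

-- ===== PRECONDITION & SPEC =====
def Spec_legite (tab : List Int) (out : Bool) : Prop := out = legite_alt tab
instance (tab : List Int) (out : Bool) : Decidable (Spec_legite tab out) := by unfold Spec_legite; infer_instance

-- ===== CLAIM (what is proved, stated in full; the proofs are below) =====
def Claim_equal_legite : Prop := ∀ (tab : List Int), Dom_legite tab → Spec_legite tab (legite tab)

-- ===== LEMMAS AND PROOFS =====

-- A's per-step check does not depend on the visited list: every "over a cell" jump target is
-- already absent from the corresponding direct-successor list, so those branches return False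
-- whether or not the cell was visited.
set_option maxHeartbeats 1000000 in
lemma body_eq (prec : List Int) (a b : Int) :
    legiteBody prec a b =
      (match PySem.Dict.get? pvAllowed a with
       | some s => !(s.contains b)
       | none => false) := by
  by_cases h1 : a = 1
  · subst h1
    have hg : PySem.Dict.get? pvAllowed 1 = some [2,4,5,8,6] := by decide
    rw [hg]
    by_cases hb : ([2,4,5,8,6] : List Int).contains b = true
    · have : b = 2 ∨ b = 4 ∨ b = 5 ∨ b = 8 ∨ b = 6 := by simpa using hb
      rcases this with h|h|h|h|h <;> subst h <;> simp [legiteBody]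
    · have hbs : b ≠ 2 ∧ b ≠ 4 ∧ b ≠ 5 ∧ b ≠ 8 ∧ b ≠ 6 := by simpa using hb
      obtain ⟨hn2, hn4, hn5, hn8, hn6⟩ := hbs
      simp [legiteBody, hn2, hn4, hn5, hn8, hn6]
  by_cases h2 : a = 2
  · subst h2
    have hg : PySem.Dict.get? pvAllowed 2 = some [1,3,4,5,6,7,9] := by decide
    rw [hg]
    by_cases hb : ([1,3,4,5,6,7,9] : List Int).contains b = true
    · have : b = 1 ∨ b = 3 ∨ b = 4 ∨ b = 5 ∨ b = 6 ∨ b = 7 ∨ b = 9 := by simpa using hb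
      rcases this with h|h|h|h|h|h|h <;> subst h <;> simp [legiteBody]
    · have hbs : b ≠ 1 ∧ b ≠ 3 ∧ b ≠ 4 ∧ b ≠ 5 ∧ b ≠ 6 ∧ b ≠ 7 ∧ b ≠ 9 := by simpa using hb
      obtain ⟨hn1, hn3, hn4, hn5, hn6, hn7, hn9⟩ := hbs
      simp [legiteBody, hn1, hn3, hn4, hn5, hn6, hn7, hn9]
  by_cases h3 : a = 3
  · subst h3
    have hg : PySem.Dict.get? pvAllowed 3 = some [2,4,5,8,6] := by decide
    rw [hg]
    by_cases hb : ([2,4,5,8,6] : List Int).contains b = true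
    · have : b = 2 ∨ b = 4 ∨ b = 5 ∨ b = 8 ∨ b = 6 := by simpa using hb
      rcases this with h|h|h|h|h <;> subst h <;> simp [legiteBody]
    · have hbs : b ≠ 2 ∧ b ≠ 4 ∧ b ≠ 5 ∧ b ≠ 8 ∧ b ≠ 6 := by simpa using hb
      obtain ⟨hn2, hn4, hn5, hn8, hn6⟩ := hbs
      simp [legiteBody, hn2, hn4, hn5, hn8, hn6]
  by_cases h4 : a = 4
  · subst h4
    have hg : PySem.Dict.get? pvAllowed 4 = some [1,2,3,5,7,8,9] := by decide
    rw [hg]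
    by_cases hb : ([1,2,3,5,7,8,9] : List Int).contains b = true
    · have : b = 1 ∨ b = 2 ∨ b = 3 ∨ b = 5 ∨ b = 7 ∨ b = 8 ∨ b = 9 := by simpa using hb
      rcases this with h|h|h|h|h|h|h <;> subst h <;> simp [legiteBody]
    · have hbs : b ≠ 1 ∧ b ≠ 2 ∧ b ≠ 3 ∧ b ≠ 5 ∧ b ≠ 7 ∧ b ≠ 8 ∧ b ≠ 9 := by simpa using hb
      obtain ⟨hn1, hn2, hn3, hn5, hn7, hn8, hn9⟩ := hbs
      simp [legiteBody, hn1, hn2, hn3, hn5, hn7, hn8, hn9]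
  by_cases h6 : a = 6
  · subst h6
    have hg : PySem.Dict.get? pvAllowed 6 = some [1,2,3,5,7,8,9] := by decide
    rw [hg]
    by_cases hb : ([1,2,3,5,7,8,9] : List Int).contains b = true
    · have : b = 1 ∨ b = 2 ∨ b = 3 ∨ b = 5 ∨ b = 7 ∨ b = 8 ∨ b = 9 := by simpa using hb
      rcases this with h|h|h|h|h|h|h <;> subst h <;> simp [legiteBody]
    · have hbs : b ≠ 1 ∧ b ≠ 2 ∧ b ≠ 3 ∧ b ≠ 5 ∧ b ≠ 7 ∧ b ≠ 8 ∧ b ≠ 9 := by simpa using hb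
      obtain ⟨hn1, hn2, hn3, hn5, hn7, hn8, hn9⟩ := hbs
      simp [legiteBody, hn1, hn2, hn3, hn5, hn7, hn8, hn9]
  by_cases h7 : a = 7
  · subst h7
    have hg : PySem.Dict.get? pvAllowed 7 = some [2,4,5,8,6] := by decide
    rw [hg]
    by_cases hb : ([2,4,5,8,6] : List Int).contains b = true
    · have : b = 2 ∨ b = 4 ∨ b = 5 ∨ b = 8 ∨ b = 6 := by simpa using hb
      rcases this with h|h|h|h|h <;> subst h <;> simp [legiteBody]
    · have hbs : b ≠ 2 ∧ b ≠ 4 ∧ b ≠ 5 ∧ b ≠ 8 ∧ b ≠ 6 := by simpa using hb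
      obtain ⟨hn2, hn4, hn5, hn8, hn6⟩ := hbs
      simp [legiteBody, hn2, hn4, hn5, hn8, hn6]
  by_cases h8 : a = 8
  · subst h8
    have hg : PySem.Dict.get? pvAllowed 8 = some [1,3,4,5,6,7,9] := by decide
    rw [hg]
    by_cases hb : ([1,3,4,5,6,7,9] : List Int).contains b = true
    · have : b = 1 ∨ b = 3 ∨ b = 4 ∨ b = 5 ∨ b = 6 ∨ b = 7 ∨ b = 9 := by simpa using hb
      rcases this with h|h|h|h|h|h|h <;> subst h <;> simp [legiteBody]
    · have hbs : b ≠ 1 ∧ b ≠ 3 ∧ b ≠ 4 ∧ b ≠ 5 ∧ b ≠ 6 ∧ b ≠ 7 ∧ b ≠ 9 := by simpa using hb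
      obtain ⟨hn1, hn3, hn4, hn5, hn6, hn7, hn9⟩ := hbs
      simp [legiteBody, hn1, hn3, hn4, hn5, hn6, hn7, hn9]
  by_cases h9 : a = 9
  · subst h9
    have hg : PySem.Dict.get? pvAllowed 9 = some [2,4,5,8,6] := by decide
    rw [hg]
    by_cases hb : ([2,4,5,8,6] : List Int).contains b = true
    · have : b = 2 ∨ b = 4 ∨ b = 5 ∨ b = 8 ∨ b = 6 := by simpa using hb
      rcases this with h|h|h|h|h <;> subst h <;> simp [legiteBody]
    · have hbs : b ≠ 2 ∧ b ≠ 4 ∧ b ≠ 5 ∧ b ≠ 8 ∧ b ≠ 6 := by simpa using hb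
      obtain ⟨hn2, hn4, hn5, hn8, hn6⟩ := hbs
      simp [legiteBody, hn2, hn4, hn5, hn8, hn6]
  · have hg : PySem.Dict.get? pvAllowed a = none := by
      simp [pvAllowed, PySem.Dict.ofList, PySem.Dict.get?, PySem.Dict.empty, PySem.Dict.update]
      intro x c hx; fin_cases hx <;> omega
    rw [hg]
    simp [legiteBody, h1, h2, h3, h4, h6, h7, h8, h9]

-- A's loop from index i equals B's pair scan over the suffix, for every visited list prec.
lemma go_eq (k : Nat) (tab prec : List Int) (i : Nat) (hk : tab.length ≤ i + k) :
    legiteGo tab prec i = legiteAltGo ((tab.drop i).zip (tab.drop (i+1))) := by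
  induction k generalizing prec i with
  | zero =>
    have h : ¬ (i + 1 < tab.length) := by omega
    rw [legiteGo, if_neg h, List.drop_eq_nil_of_le (by omega)]
    simp [legiteAltGo]
  | succ k ih =>
    by_cases h : i + 1 < tab.length
    · have hi : i < tab.length := by omega
      have hdi : tab.drop i = tab[i] :: tab.drop (i+1) := List.drop_eq_getElem_cons hi
      have hdi1 : tab.drop (i+1) = tab[i+1] :: tab.drop (i+2) := List.drop_eq_getElem_cons h
      rw [legiteGo, if_pos h]
      simp only [List.getElem?_eq_getElem hi, List.getElem?_eq_getElem h, Option.getD_some]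
      rw [hdi, hdi1, List.zip_cons_cons, ← hdi1, legiteAltGo, body_eq]
      cases hm : PySem.Dict.get? pvAllowed tab[i] with
      | none => simpa using ih (prec ++ [tab[i]]) (i+1) (by omega)
      | some s =>
        simp
        rw [ih (prec ++ [tab[i]]) (i+1) (by omega)]
    · rw [legiteGo, if_neg h]
      have : tab.drop (i+1) = [] := List.drop_eq_nil_of_le (by omega)
      rw [this, List.zip_nil_right]
      simp [legiteAltGo]

-- ===== VERDICT (by name: the statement is the Claim_ definition above) =====
theorem legite_spec : Claim_equal_legite := by
  intro tab _
  unfold Spec_legite legite legite_alt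
  have := go_eq tab.length tab [] 0 (by omega)
  simpa [List.tail_drop] using this
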